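-- pv_equiv track=rewrite | github.com/Arcadia-Science/2024-organismal-selection | code/genefam_aa_summaries.py | generate_alternative_sequences
-- ===== SOURCE A (Python) =====
-- from itertools import product
--
-- def generate_alternative_sequences(seq):
--     ambiguous_aa_mapping = {"B": ["D", "N"], "J": ["I", "L"], "Z": ["E", "Q"]}
--     positions_and_replacements = [
--         (i, ambiguous_aa_mapping[aa])
--         for i, aa in enumerate(seq)
--         if aa in ambiguous_aa_mapping
--     ]
--     if not positions_and_replacements:
--         return [seq]
--     positions, replacements_list = zip(*positions_and_replacements)
--     alternative_sequences = []
--     for replacements in product(*replacements_list):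
--         alternative_seq_list = list(seq)
--         for position, replacement in zip(positions, replacements):
--             alternative_seq_list[position] = replacement
--         alternative_sequences.append("".join(alternative_seq_list))
--     return alternative_sequences
-- ===== SOURCE B (Python) =====
-- def generate_alternative_sequences(seq):
--     ambiguous_aa_mapping = {"B": ["D", "N"], "J": ["I", "L"], "Z": ["E", "Q"]}
--     acc = [""]
--     for ch in seq:
--         if ch in ambiguous_aa_mapping:
--             acc = [p + r for p in acc for r in ambiguous_aa_mapping[ch]]
--         else:
--             acc = [p + ch for p in acc]
--     return acc
-- ===== Notes on version B (the rewrite author's own statement) =====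
-- stated objective: simpler
-- what changed: Replaces the collect-positions / itertools.product / per-combination list-splice-and-join pipeline with a single left-to-right pass that extends an accumulator of partial strings character by character.
import Mathlib
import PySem

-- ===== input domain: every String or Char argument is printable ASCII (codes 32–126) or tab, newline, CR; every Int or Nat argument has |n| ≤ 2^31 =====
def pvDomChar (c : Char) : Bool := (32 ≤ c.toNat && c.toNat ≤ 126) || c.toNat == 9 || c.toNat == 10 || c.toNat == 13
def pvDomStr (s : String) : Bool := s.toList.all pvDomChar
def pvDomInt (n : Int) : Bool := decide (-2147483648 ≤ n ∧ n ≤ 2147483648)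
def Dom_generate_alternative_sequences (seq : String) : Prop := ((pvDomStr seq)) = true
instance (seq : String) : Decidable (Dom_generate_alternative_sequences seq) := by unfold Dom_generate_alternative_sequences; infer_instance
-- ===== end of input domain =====

-- B replaces A's collect-positions / itertools.product / per-combination splice-and-join pipeline
-- with a single left-to-right pass extending an accumulator of partial strings (objective: simpler).

-- ===== PORT A =====
-- the dict literal {"B": ["D","N"], "J": ["I","L"], "Z": ["E","Q"]} (keys/values are 1-char strings ⇒ Char)
def pvMapA : PySem.Dict Char (List Char) :=
  PySem.Dict.ofList [('B', ['D', 'N']), ('J', ['I', 'L']), ('Z', ['E', 'Q'])]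

-- itertools.product over a list of lists, first factor varying slowest
def pvProdA : List (List Char) → List (List Char)
  | [] => [[]]
  | l :: ls => l.flatMap (fun x => (pvProdA ls).map (x :: ·))

def generate_alternative_sequences (seq : String) : List String :=
  let cs := seq.toList
  -- [(i, mapping[aa]) for i, aa in enumerate(seq) if aa in mapping]
  let positions_and_replacements : List (Int × List Char) :=
    (PySem.List.enumerate cs 0).filterMap (fun p => (pvMapA.get? p.2).map (fun rs => (p.1, rs)))
  if positions_and_replacements = [] then [seq]
  else
    let positions := positions_and_replacements.map (·.1)
    let replacements_list := positions_and_replacements.map (·.2)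
    (pvProdA replacements_list).map (fun combo =>
      -- list(seq); list[position] = replacement; "".join(...)
      -- enumerate indices are 0 ≤ i < len seq, so `.toNat` + List.set is exactly Python's assignment here
      String.ofList (((positions.zip combo).foldl (fun l pr => l.set pr.1.toNat pr.2) cs)))

-- ===== PORT B =====
def pvMapB : PySem.Dict Char (List Char) :=
  PySem.Dict.ofList [('B', ['D', 'N']), ('J', ['I', 'L']), ('Z', ['E', 'Q'])]

def generate_alternative_sequences_alt (seq : String) : List String :=
  seq.toList.foldl
    (fun acc ch =>
      match pvMapB.get? ch with
      | some rs => acc.flatMap (fun p => rs.map (fun r => p.push r))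
      | none => acc.map (fun p => p.push ch))
    [""]

-- ===== PRECONDITION & SPEC =====
def Spec_generate_alternative_sequences (seq : String) (out : List String) : Prop := out = generate_alternative_sequences_alt seq
instance (seq : String) (out : List String) : Decidable (Spec_generate_alternative_sequences seq out) := by unfold Spec_generate_alternative_sequences; infer_instance

-- ===== CLAIM (what is proved, stated in full; the proofs are below) =====
def Claim_equal_generate_alternative_sequences : Prop := ∀ (seq : String), Dom_generate_alternative_sequences seq → Spec_generate_alternative_sequences seq (generate_alternative_sequences seq)

-- ===== LEMMAS AND PROOFS =====

-- reference expansion, recursion on the character list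
def pvExpand : List Char → List (List Char)
  | [] => [[]]
  | c :: cs =>
    match pvMapA.get? c with
    | some rs => rs.flatMap (fun r => (pvExpand cs).map (r :: ·))
    | none => (pvExpand cs).map (c :: ·)

-- A's position/replacement pairs, with Nat indices, as structural recursion
def pvPairs : List Char → List (Nat × List Char)
  | [] => []
  | c :: cs =>
    match pvMapA.get? c with
    | some rs => (0, rs) :: (pvPairs cs).map (fun p => (p.1 + 1, p.2))
    | none => (pvPairs cs).map (fun p => (p.1 + 1, p.2))

theorem pv_enumerate_shift (cs : List Char) (s : Int) :
    PySem.List.enumerate cs (s + 1) = (PySem.List.enumerate cs s).map (fun p => (p.1 + 1, p.2)) := by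
  induction cs generalizing s with
  | nil => simp [PySem.List.enumerate_nil]
  | cons c cs ih => simp [PySem.List.enumerate_cons, ih]

theorem pv_filterMap_shift (l : List (Int × Char)) :
    l.filterMap (fun x => (pvMapA.get? x.2).map (fun rs => (x.1 + 1, rs)))
      = (l.filterMap (fun p => (pvMapA.get? p.2).map (fun rs => (p.1, rs)))).map
          (fun p => (p.1 + 1, p.2)) := by
  induction l with
  | nil => simp
  | cons q l ih =>
    cases hq : pvMapA.get? q.2 <;> simp [hq, ih]

theorem pv_pairs_eq (cs : List Char) :
    (PySem.List.enumerate cs 0).filterMap (fun p => (pvMapA.get? p.2).map (fun rs => (p.1, rs)))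
      = (pvPairs cs).map (fun p => ((p.1 : Int), p.2)) := by
  induction cs with
  | nil => simp [PySem.List.enumerate_nil, pvPairs]
  | cons c cs ih =>
    rw [PySem.List.enumerate_cons, show (0 : Int) + 1 = 0 + 1 by ring, pv_enumerate_shift]
    cases h : pvMapA.get? c with
    | some rs =>
      simp only [List.filterMap_cons, h, Option.map_some, List.filterMap_map, Function.comp_def,
        pvPairs]
      rw [pv_filterMap_shift, ih]
      simp only [List.map_map, Function.comp_def, List.map_cons]
      refine congrArg _ (List.map_congr_left ?_)
      intro p _
      simp
    | none =>
      simp only [List.filterMap_cons, h, Option.map_none, List.filterMap_map, Function.comp_def,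
        pvPairs]
      rw [pv_filterMap_shift, ih]
      simp only [List.map_map, Function.comp_def]
      refine List.map_congr_left ?_
      intro p _
      simp

def pvApply (l : List Char) (ps : List (Nat × Char)) : List Char :=
  ps.foldl (fun l pr => l.set pr.1 pr.2) l

theorem pv_apply_shift (ps : List Nat) (combo : List Char) (l : List Char) (c : Char) :
    pvApply (c :: l) ((ps.map (· + 1)).zip combo) = c :: pvApply l (ps.zip combo) := by
  induction ps generalizing combo l c with
  | nil => simp [pvApply]
  | cons a ps ih =>
    cases combo with
    | nil => simp [pvApply]
    | cons r combo => simpa [pvApply, List.foldl] using ih combo (l.set a r) c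

theorem pv_apply_int (ps : List Nat) (combo : List Char) (l : List Char) :
    List.foldl (fun l pr => l.set pr.1.toNat pr.2) l
        ((ps.map (fun (n : Nat) => ((n : Int)))).zip combo) = pvApply l (ps.zip combo) := by
  induction ps generalizing combo l with
  | nil => simp [pvApply]
  | cons a ps ih =>
    cases combo with
    | nil => simp [pvApply]
    | cons r combo => simpa [pvApply, List.foldl] using ih combo (l.set a r)

-- A's else-branch body over the structural pairs
theorem pv_core (cs : List Char) :
    (pvProdA ((pvPairs cs).map (·.2))).map
        (fun combo => pvApply cs (((pvPairs cs).map (·.1)).zip combo)) = pvExpand cs := by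
  induction cs with
  | nil => simp [pvPairs, pvProdA, pvApply, pvExpand]
  | cons c cs ih =>
    cases h : pvMapA.get? c with
    | some rs =>
      simp only [pvPairs, pvExpand, h, pvProdA, List.map_cons, List.map_map, List.map_flatMap,
        Function.comp_def]
      refine List.flatMap_congr ?_
      intro r _
      rw [← ih, List.map_map]
      refine List.map_congr_left ?_
      intro combo _
      simp only [Function.comp_def]
      rw [show (0 :: (pvPairs cs).map (fun p => p.1 + 1)).zip (r :: combo)
            = (0, r) :: ((pvPairs cs).map (fun p => p.1 + 1)).zip combo from rfl]
      show pvApply ((c :: cs).set 0 r) _ = _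
      rw [List.set_cons_zero,
        show (pvPairs cs).map (fun p => p.1 + 1) = ((pvPairs cs).map (·.1)).map (· + 1) by
          simp [List.map_map],
        pv_apply_shift]
    | none =>
      simp only [pvPairs, pvExpand, h, List.map_map, Function.comp_def]
      rw [← ih, List.map_map]
      refine List.map_congr_left ?_
      intro combo _
      simp only [Function.comp_def]
      rw [show (pvPairs cs).map (fun p => p.1 + 1) = ((pvPairs cs).map (·.1)).map (· + 1) by
          simp [List.map_map],
        pv_apply_shift]

theorem pv_pairs_nil_expand (cs : List Char) (h : pvPairs cs = []) : pvExpand cs = [cs] := by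
  induction cs with
  | nil => simp [pvExpand]
  | cons c cs ih =>
    cases hc : pvMapA.get? c with
    | some rs => simp [pvPairs, hc] at h
    | none =>
      simp only [pvPairs, hc] at h
      simp [pvExpand, hc, ih (List.map_eq_nil_iff.mp h)]

-- B's fold in terms of pvExpand
theorem pv_alt_fold (cs : List Char) (acc : List String) :
    cs.foldl
        (fun acc ch =>
          match pvMapB.get? ch with
          | some rs => acc.flatMap (fun p => rs.map (fun r => p.push r))
          | none => acc.map (fun p => p.push ch)) acc
      = acc.flatMap (fun p => (pvExpand cs).map (fun t => p ++ String.ofList t)) := by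
  induction cs generalizing acc with
  | nil => simp [pvExpand]
  | cons c cs ih =>
    have hmap : pvMapB.get? c = pvMapA.get? c := rfl
    cases h : pvMapA.get? c with
    | some rs =>
      simp only [List.foldl_cons, hmap, h, ih, pvExpand, List.flatMap_map, List.map_flatMap,
        List.flatMap_assoc]
      refine List.flatMap_congr ?_
      intro p _
      refine List.flatMap_congr ?_
      intro r _
      rw [List.map_map]
      refine List.map_congr_left ?_
      intro t _
      apply String.toList_injective
      simp
    | none =>
      simp only [List.foldl_cons, hmap, h, ih, pvExpand, List.flatMap_map, List.map_map]
      refine List.flatMap_congr ?_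
      intro p _
      refine List.map_congr_left ?_
      intro t _
      simp only [Function.comp_def]
      apply String.toList_injective
      simp

theorem pv_alt_eq (seq : String) :
    generate_alternative_sequences_alt seq = (pvExpand seq.toList).map String.ofList := by
  unfold generate_alternative_sequences_alt
  rw [pv_alt_fold]
  simp

theorem pv_a_eq (seq : String) :
    generate_alternative_sequences seq = (pvExpand seq.toList).map String.ofList := by
  unfold generate_alternative_sequences
  simp only [pv_pairs_eq]
  by_cases h : pvPairs seq.toList = []
  · simp [h, pv_pairs_nil_expand _ h]
  · rw [if_neg (by simpa using h)]
    rw [← pv_core seq.toList]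
    simp only [List.map_map, Function.comp_def]
    refine List.map_congr_left ?_
    intro combo _
    refine congrArg _ ?_
    rw [show (pvPairs seq.toList).map (fun p => ((p.1 : Int))) =
          ((pvPairs seq.toList).map (·.1)).map (fun (n : Nat) => ((n : Int))) by simp [List.map_map]]
    exact pv_apply_int ((pvPairs seq.toList).map (·.1)) combo seq.toList

-- ===== VERDICT (by name: the statement is the Claim_ definition above) =====
theorem generate_alternative_sequences_spec : Claim_equal_generate_alternative_sequences := by
  intro seq _
  unfold Spec_generate_alternative_sequences
  rw [pv_a_eq, pv_alt_eq]
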